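-- pv_equiv track=rewrite | github.com/nabilahmadfurqon/Project-Python | Count Word.py | count_words_and_letters
-- ===== SOURCE A (Python) =====
-- def count_words_and_letters(text):
--     words = text.split()
--     word_count = 0
--     letter_count = 0
--
--     for word in words:
--         word_count += 1
--         letter_count += len(word)
--
--     return word_count, letter_count
-- ===== SOURCE B (Python) =====
-- def count_words_and_letters(text):
--     word_count = 0
--     letter_count = 0
--     in_word = False
--     for c in text:
--         if c.isspace():
--             in_word = False
--         else:
--             letter_count += 1
--             if not in_word:
--                 word_count += 1
--                 in_word = True
--     return word_count, letter_count
-- ===== Notes on version B (the rewrite author's own statement) =====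
-- stated objective: alternative
-- what changed: B replaces split()-then-count with a single character scan keeping an in_word flag, never materialising the list of words (O(1) extra space, but slower in CPython since split() runs in C).
import Mathlib
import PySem

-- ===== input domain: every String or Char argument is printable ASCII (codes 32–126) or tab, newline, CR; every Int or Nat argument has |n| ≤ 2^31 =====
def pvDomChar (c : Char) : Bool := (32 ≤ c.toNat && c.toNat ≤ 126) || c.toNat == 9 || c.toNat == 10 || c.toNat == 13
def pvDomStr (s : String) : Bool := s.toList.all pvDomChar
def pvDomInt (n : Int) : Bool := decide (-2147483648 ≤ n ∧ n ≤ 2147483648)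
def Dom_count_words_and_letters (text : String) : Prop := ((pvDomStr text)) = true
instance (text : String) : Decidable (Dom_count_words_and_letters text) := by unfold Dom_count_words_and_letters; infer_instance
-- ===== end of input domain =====

-- B: single character scan with an in_word flag instead of split()-then-count; same counts, no word list built.

-- ===== PORT A =====
def count_words_and_letters (text : String) : Int × Int :=
  let words := PySem.Str.split₀ text
  let p := words.foldl (fun (p : Int × Int) w => (p.1 + 1, p.2 + (PySem.Str.len w : Int))) (0, 0)
  p

-- ===== PORT B =====
def count_words_and_letters_alt (text : String) : Int × Int :=
  let st := text.toList.foldl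
    (fun (st : Bool × Int × Int) c =>
      if PySem.Chars.isspace c then (false, st.2.1, st.2.2)
      else (true, (if st.1 then st.2.1 else st.2.1 + 1), st.2.2 + 1))
    (false, 0, 0)
  (st.2.1, st.2.2)

-- ===== PRECONDITION & SPEC =====
def Spec_count_words_and_letters (text : String) (out : Int × Int) : Prop := out = count_words_and_letters_alt text
instance (text : String) (out : Int × Int) : Decidable (Spec_count_words_and_letters text out) := by unfold Spec_count_words_and_letters; infer_instance

-- ===== CLAIM (what is proved, stated in full; the proofs are below) =====
def Claim_equal_count_words_and_letters : Prop := ∀ (text : String), Dom_count_words_and_letters text → Spec_count_words_and_letters text (count_words_and_letters text)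

-- ===== LEMMAS AND PROOFS =====

-- A's counting fold over a list of words computes (length, sum of lengths), shifted by the start state.
theorem foldl_count (ws : List (List Char)) (wc lc : Int) :
    ws.foldl (fun (p : Int × Int) w => (p.1 + 1, p.2 + (w.length : Int))) (wc, lc)
      = (wc + ws.length, lc + ((ws.map List.length).sum : Int)) := by
  induction ws generalizing wc lc with
  | nil => simp
  | cons w t ih => simp [List.foldl_cons, ih, Prod.ext_iff]; constructor <;> push_cast <;> ring

-- B's scan, started mid-way through split₀.go (acc = words already closed,
-- cur = the reversed open word), adds exactly the words/letters split₀.go still produces.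
theorem scan_go (s : List Char) : ∀ (cur : List Char) (acc : List (List Char)) (W L : Int),
    (s.foldl
      (fun (st : Bool × Int × Int) c =>
        if PySem.Chars.isspace c then (false, st.2.1, st.2.2)
        else (true, (if st.1 then st.2.1 else st.2.1 + 1), st.2.2 + 1))
      (!cur.isEmpty, W, L)).2
    = (W + (((PySem.Chars.split₀.go s cur acc).length : Int)
            - ((acc.length : Int) + (if cur.isEmpty then 0 else 1))),
       L + ((((PySem.Chars.split₀.go s cur acc).map List.length).sum : Int)
            - (((acc.map List.length).sum : Int) + cur.length))) := by
  induction s with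
  | nil =>
    intro cur acc W L
    by_cases h : cur.isEmpty
    · obtain rfl : cur = [] := List.isEmpty_iff.mp h
      simp [PySem.Chars.split₀.go]
    · simp [PySem.Chars.split₀.go, h, List.map_reverse, List.sum_reverse]
  | cons c rest ih =>
    intro cur acc W L
    by_cases hs : PySem.Chars.isspace c
    · by_cases h : cur.isEmpty
      · obtain rfl : cur = [] := List.isEmpty_iff.mp h
        have := ih [] acc W L
        simpa [PySem.Chars.split₀.go, hs] using this
      · have := ih [] (cur.reverse :: acc) W L
        simp [PySem.Chars.split₀.go, hs, h] at this ⊢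
        rw [this]
        congr 1 <;> push_cast <;> ring
    · have := ih (c :: cur) acc (if cur.isEmpty then W + 1 else W) (L + 1)
      by_cases h : cur.isEmpty
      · obtain rfl : cur = [] := List.isEmpty_iff.mp h
        simp [PySem.Chars.split₀.go, hs] at this ⊢
        rw [this]
        congr 1 <;> push_cast <;> ring
      · simp [PySem.Chars.split₀.go, hs, h] at this ⊢
        rw [this]
        congr 1 <;> push_cast <;> ring

-- ===== VERDICT (by name: the statement is the Claim_ definition above) =====
theorem count_words_and_letters_spec : Claim_equal_count_words_and_letters := by
  intro text _
  unfold Spec_count_words_and_letters count_words_and_letters count_words_and_letters_alt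
  have hB := scan_go text.toList [] [] 0 0
  simp only [List.isEmpty_nil, Bool.not_true, List.length_nil, List.map_nil,
    List.sum_nil, Nat.cast_zero, if_pos, CharP.cast_eq_zero] at hB
  have hA := foldl_count (PySem.Chars.split₀ text.toList) 0 0
  simp only [PySem.Chars.split₀] at hA
  simp [PySem.Str.split₀, PySem.Str.len, List.foldl_map, hB, PySem.Chars.split₀, hA,
    Nat.cast_list_sum, List.map_map]
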